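-- pv_equiv track=rewrite | github.com/tuxedocat/gym | aoj/course/alds1_2_d.py | gapgen
-- ===== SOURCE A (Python) =====
-- def gapgen(n):
--     if n == 1:
--         return [1]
--     gaps = []
--     tmp = 0
--     for i in range(n):
--         if i == 1:
--             gaps.append(i)
--             tmp = i
--         elif i == 3 * tmp + 1:
--             gaps.append(i)
--             tmp = i
--     gaps.reverse()
--     return gaps[:100]
-- ===== SOURCE B (Python) =====
-- def gapgen(n):
--     if n == 1:
--         return [1]
--     gaps = []
--     g = 1
--     while g < n:
--         gaps.append(g)
--         g = 3 * g + 1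
--     gaps.reverse()
--     return gaps[:100]
-- ===== Notes on version B (the rewrite author's own statement) =====
-- stated objective: faster
-- what changed: Instead of scanning every integer 0..n-1 and testing it against 3*tmp+1, B generates the Knuth gap sequence directly with g = 3*g + 1 while g < n.
import Mathlib
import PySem

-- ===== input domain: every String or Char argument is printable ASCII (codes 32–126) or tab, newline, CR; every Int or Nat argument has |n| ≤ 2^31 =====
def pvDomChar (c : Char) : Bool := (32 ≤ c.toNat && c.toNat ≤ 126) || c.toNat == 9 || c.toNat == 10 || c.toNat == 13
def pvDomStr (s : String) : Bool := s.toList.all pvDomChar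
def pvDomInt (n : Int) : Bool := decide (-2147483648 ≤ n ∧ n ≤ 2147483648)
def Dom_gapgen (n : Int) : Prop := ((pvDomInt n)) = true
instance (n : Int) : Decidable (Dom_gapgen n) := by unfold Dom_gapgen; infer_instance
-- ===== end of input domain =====

-- B replaces A's O(n) scan of all integers below n with direct generation of the
-- Knuth gap sequence (g := 3*g+1 while g < n), which is O(log n).

-- ===== PORT A =====
-- state (gaps, tmp); branches in A's order
def gapgenStep (p : List Int × Int) (i : Int) : List Int × Int :=
  if i == 1 then (p.1 ++ [i], i)
  else if i == 3 * p.2 + 1 then (p.1 ++ [i], i)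
  else p

def gapgen (n : Int) : List Int :=
  if n == 1 then [1]
  else
    let st := (PySem.List.pyRange 0 n 1).foldl gapgenStep ([], 0)
    PySem.List.slice st.1.reverse none (some 100)

-- ===== PORT B =====
-- the while loop: append g, then g := 3*g+1, while g < n (1 ≤ g for termination; g is always ≥ 1)
def gapgenLoop (n g : Int) (acc : List Int) (hg : 1 ≤ g) : List Int :=
  if h : g < n then gapgenLoop n (3 * g + 1) (acc ++ [g]) (by omega)
  else acc
termination_by (n - g).toNat
decreasing_by omega

def gapgen_alt (n : Int) : List Int :=
  if n == 1 then [1]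
  else PySem.List.slice (gapgenLoop n 1 [] (by omega)).reverse none (some 100)

-- ===== PRECONDITION & SPEC =====
def Spec_gapgen (n : Int) (out : List Int) : Prop := out = gapgen_alt n
instance (n : Int) (out : List Int) : Decidable (Spec_gapgen n out) := by unfold Spec_gapgen; infer_instance

-- ===== CLAIM (what is proved, stated in full; the proofs are below) =====
def Claim_equal_gapgen : Prop := ∀ (n : Int), Dom_gapgen n → Spec_gapgen n (gapgen n)

-- ===== LEMMAS AND PROOFS =====

-- Invariant: folding A's step over range [k, n) from state (acc, g) with 2 ≤ k,
-- 1 ≤ g, k ≤ 3g+1 collects exactly the gaps the while loop produces from 3g+1.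
theorem fold_eq_loop (n : Int) : ∀ (k g : Int) (acc : List Int)
    (hk : 2 ≤ k) (hg : 1 ≤ g) (hle : k ≤ 3 * g + 1),
    ((PySem.List.pyRange k n 1).foldl gapgenStep (acc, g)).1
      = gapgenLoop n (3 * g + 1) acc (by omega) := by
  intro k g acc hk hg hle
  by_cases h : n ≤ k
  · rw [PySem.List.pyRange_one_eq_nil h]
    rw [gapgenLoop]
    simp only [List.foldl_nil]
    rw [dif_neg (by omega)]
  · replace h : k < n := by omega
    rw [PySem.List.pyRange_one_cons h, List.foldl_cons]
    by_cases he : k = 3 * g + 1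
    · subst he
      have hstep : gapgenStep (acc, g) (3 * g + 1) = (acc ++ [3 * g + 1], 3 * g + 1) := by
        simp only [gapgenStep]
        rw [if_neg (by simp; omega), if_pos (by simp)]
      rw [hstep]
      rw [fold_eq_loop n (3 * g + 1 + 1) (3 * g + 1) (acc ++ [3 * g + 1]) (by omega) (by omega) (by omega)]
      conv_rhs => rw [gapgenLoop]
      rw [dif_pos (by omega)]
    · have hstep : gapgenStep (acc, g) k = (acc, g) := by
        simp only [gapgenStep]
        rw [if_neg (by simp; omega), if_neg (by simp; omega)]
      rw [hstep]
      exact fold_eq_loop n (k + 1) g acc (by omega) hg (by omega)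
termination_by k => (n - k).toNat
decreasing_by all_goals omega

theorem gapgen_spec : Claim_equal_gapgen := by
  intro n _
  unfold Spec_gapgen gapgen gapgen_alt
  by_cases h1 : n = 1
  · simp [h1]
  · rw [if_neg (by simpa), if_neg (by simpa)]
    congr 2
    by_cases h2 : n ≤ 0
    · rw [PySem.List.pyRange_one_eq_nil h2]
      simp only [List.foldl_nil]
      rw [gapgenLoop, dif_neg (by omega)]
    · -- n ≥ 2: peel i = 0 and i = 1 off the range, then apply the invariant
      have hn2 : 2 ≤ n := by omega
      rw [PySem.List.pyRange_one_cons (by omega : (0:Int) < n),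
          show PySem.List.pyRange (0+1) n 1 = _ from PySem.List.pyRange_one_cons (by omega : (0+1:Int) < n)]
      simp only [List.foldl_cons, zero_add]
      have h0 : gapgenStep ([], 0) 0 = ([], 0) := by
        simp only [gapgenStep]; rw [if_neg (by simp), if_neg (by simp)]
      have h1' : gapgenStep ([], 0) 1 = ([1], 1) := by
        simp only [gapgenStep]; rw [if_pos (by simp)]; simp
      rw [h0, h1', show (1:Int)+1 = 2 from rfl]
      rw [fold_eq_loop n 2 1 [1] (by omega) (by omega) (by omega)]
      conv_rhs => rw [gapgenLoop, dif_pos (by omega : (1:Int) < n)]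
      norm_num
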